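-- pv_equiv track=rewrite | github.com/chuanriceeeeee/Python | experiment5/_8_.py | sum_equal_target
-- ===== SOURCE A (Python) =====
-- def sum_equal_target(target_list:list)->list:
--     length=len(target_list)
--     final_number=target_list[length-1]
--     after_list_tuple=[]
--     index_x,index_y=0,0
--     examine_list=[]
--     while index_x<length-1:
--         # initialize index_y everytime
--         index_y=index_x+1
--         while index_y<length-1:
--             if index_x not in examine_list and index_y not in examine_list:
--                 if target_list[index_x]+target_list[index_y]==final_number:
--                     after_list_tuple.append((index_x,index_y))
--                     examine_list.append(index_x)
--                     examine_list.append(index_y)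
--                     # find then index_x useless:out second loop
--                     break
--             index_y+=1
--         index_x+=1
--     return after_list_tuple
-- ===== SOURCE B (Python) =====
-- def sum_equal_target(target_list: list) -> list:
--     n = len(target_list)
--     final = target_list[n - 1]
--     # index of every value among positions 0..n-2, in increasing order
--     pos = {}
--     for i in range(n - 1):
--         pos[target_list[i]] = pos.get(target_list[i], []) + [i]
--     used = set()
--     result = []
--     for x in range(n - 1):
--         if x in used:
--             continue
--         for y in pos.get(final - target_list[x], []):
--             if y > x and y not in used:
--                 result.append((x, y))
--                 used.add(x)
--                 used.add(y)
--                 break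
--     return result
-- ===== Notes on version B (the rewrite author's own statement) =====
-- stated objective: faster
-- what changed: B builds a value->sorted-indices dictionary once and, for each free x, scans only the indices holding the needed complement value, instead of A's nested index scans with a linear examine_list membership test inside the inner loop.
-- outside the precondition, e.g. on sum_equal_target([]): A raises IndexError, B raises IndexError
import Mathlib
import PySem

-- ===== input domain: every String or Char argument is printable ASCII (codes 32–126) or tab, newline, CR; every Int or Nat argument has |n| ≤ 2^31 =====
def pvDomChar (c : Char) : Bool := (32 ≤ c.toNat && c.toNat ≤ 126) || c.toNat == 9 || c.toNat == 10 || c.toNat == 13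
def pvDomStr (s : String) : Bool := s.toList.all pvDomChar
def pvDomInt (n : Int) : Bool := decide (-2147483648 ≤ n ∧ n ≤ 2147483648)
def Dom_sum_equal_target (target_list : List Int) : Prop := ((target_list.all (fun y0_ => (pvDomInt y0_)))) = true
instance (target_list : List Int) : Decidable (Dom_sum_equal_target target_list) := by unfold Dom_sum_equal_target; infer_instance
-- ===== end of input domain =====

-- B replaces A's nested index scans by a value→indices dictionary built once, so the inner
-- scan over all positions disappears (objective: faster).

-- ===== PORT A =====
-- inner while loop: y runs while y < length-1; returns (after_list_tuple, examine_list)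
def pvAInner (tl : List Int) (n fin x : Int) (exm : List Int)
    (acc : List (Int × Int)) (y : Int) : List (Int × Int) × List Int :=
  if _h : y < n - 1 then
    if (¬ x ∈ exm) ∧ (¬ y ∈ exm) then
      if PySem.List.pyGetD tl x 0 + PySem.List.pyGetD tl y 0 = fin then
        (acc ++ [(x, y)], (exm ++ [x]) ++ [y])   -- append + break
      else pvAInner tl n fin x exm acc (y + 1)
    else pvAInner tl n fin x exm acc (y + 1)
  else (acc, exm)
termination_by (n - 1 - y).toNat
decreasing_by all_goals omega

-- outer while loop: x runs while x < length-1
def pvAOuter (tl : List Int) (n fin x : Int) (exm : List Int)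
    (acc : List (Int × Int)) : List (Int × Int) :=
  if _h : x < n - 1 then
    let r := pvAInner tl n fin x exm acc (x + 1)
    pvAOuter tl n fin (x + 1) r.2 r.1
  else acc
termination_by (n - 1 - x).toNat
decreasing_by omega

def sum_equal_target (target_list : List Int) : List (Int × Int) :=
  let n : Int := target_list.length
  let fin := PySem.List.pyGetD target_list (n - 1) 0
  pvAOuter target_list n fin 0 [] []

-- ===== PORT B =====
-- pos: for i in range(n-1): pos[v] = pos.get(v, []) + [i]
def pvBPos (tl : List Int) (n : Int) : PySem.Dict Int (List Int) :=
  (PySem.List.pyRange 0 (n - 1) 1).foldl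
    (fun d i => d.modify (PySem.List.pyGetD tl i 0) [] (· ++ [i])) PySem.Dict.empty

-- for y in pos.get(...): first y with y > x and y not in used (break)
def pvBScan (cands : List Int) (x : Int) (used : PySem.Set Int) : Option Int :=
  match cands with
  | [] => none
  | y :: rest => if x < y ∧ ¬ (PySem.Set.contains used y) then some y else pvBScan rest x used

-- body of B's main for loop over x; state = (used, result)
def pvBBody (tl : List Int) (fin : Int) (pos : PySem.Dict Int (List Int))
    (st : PySem.Set Int × List (Int × Int)) (x : Int) : PySem.Set Int × List (Int × Int) :=
  if PySem.Set.contains st.1 x then st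
  else
    match pvBScan (pos.getD (fin - PySem.List.pyGetD tl x 0) []) x st.1 with
    | none => st
    | some y => (PySem.Set.add (PySem.Set.add st.1 x) y, st.2 ++ [(x, y)])

def sum_equal_target_alt (target_list : List Int) : List (Int × Int) :=
  let n : Int := target_list.length
  let fin := PySem.List.pyGetD target_list (n - 1) 0
  let pos := pvBPos target_list n
  ((PySem.List.pyRange 0 (n - 1) 1).foldl (pvBBody target_list fin pos) (PySem.Set.empty, [])).2

-- ===== PRECONDITION & SPEC =====
-- Pre_ excludes only the empty list, on which target_list[length-1] raises IndexError (in B too).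
def Pre_sum_equal_target (target_list : List Int) : Prop := target_list ≠ []
instance (target_list : List Int) : Decidable (Pre_sum_equal_target target_list) := by
  unfold Pre_sum_equal_target; infer_instance
def pvWitness_sum_equal_target : List Int := [1, 4, 2, 3, 5]
def Spec_sum_equal_target (target_list : List Int) (out : List (Int × Int)) : Prop := out = sum_equal_target_alt target_list
instance (target_list : List Int) (out : List (Int × Int)) : Decidable (Spec_sum_equal_target target_list out) := by unfold Spec_sum_equal_target; infer_instance

-- ===== CLAIM (what is proved, stated in full; the proofs are below) =====
def Claim_equal_sum_equal_target : Prop := ∀ (target_list : List Int), Dom_sum_equal_target target_list → Pre_sum_equal_target target_list → Spec_sum_equal_target target_list (sum_equal_target target_list)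

-- ===== LEMMAS AND PROOFS =====

-- find? through filter (not in Mathlib in this orientation)
theorem pvFind?_filter (l : List Int) (p q : Int → Bool) :
    (l.filter q).find? p = l.find? (fun a => q a && p a) := by
  induction l with
  | nil => rfl
  | cons a l ih =>
    by_cases hq : q a <;> by_cases hp : p a <;>
      simp [hq, hp, ih]

-- find? respects pointwise-equal predicates
theorem pvFind?_congr (l : List Int) (p q : Int → Bool) (h : ∀ a ∈ l, p a = q a) :
    l.find? p = l.find? q := by
  induction l with
  | nil => rfl
  | cons a l ih =>
    have ha := h a (by simp)
    by_cases hq : q a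
    · simp [ha, hq]
    · simp only [List.find?_cons, ha, hq]
      exact ih (fun b hb => h b (by simp [hb]))

-- the dictionary maps c to the increasing list of positions i < n-1 with tl[i] = c
theorem pvBPos_getD (tl : List Int) (n c : Int) :
    (pvBPos tl n).getD c [] =
      (PySem.List.pyRange 0 (n - 1) 1).filter (fun i => PySem.List.pyGetD tl i 0 == c) := by
  unfold pvBPos
  have h := PySem.Dict.getD_foldl_modify_append
    (l := (PySem.List.pyRange 0 (n - 1) 1).map (fun i => (PySem.List.pyGetD tl i 0, i)))
    (d := (PySem.Dict.empty : PySem.Dict Int (List Int))) (c := c)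
  rw [List.foldl_map] at h
  rw [h]
  simp [PySem.Dict.getD_empty, List.filter_map, Function.comp_def]

-- the for/break scan is find?
theorem pvBScan_eq_find? (cands : List Int) (x : Int) (used : PySem.Set Int) :
    pvBScan cands x used
      = cands.find? (fun y => decide (x < y) && !(PySem.Set.contains used y)) := by
  induction cands with
  | nil => rfl
  | cons y rest ih =>
    by_cases h1 : x < y <;> by_cases h2 : y ∈ used <;>
      simp [pvBScan, PySem.Set.contains, h1, h2, ih]

-- B's per-x search equals a find? over the indices x+1 .. n-2
theorem pvBScan_pos (tl : List Int) (n x c : Int) (used : PySem.Set Int)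
    (h0 : 0 ≤ x) (hx : x < n - 1) :
    pvBScan ((pvBPos tl n).getD c []) x used
      = (PySem.List.pyRange (x + 1) (n - 1) 1).find?
          (fun y => !(PySem.Set.contains used y) && (PySem.List.pyGetD tl y 0 == c)) := by
  rw [pvBScan_eq_find?, pvBPos_getD, pvFind?_filter,
    PySem.List.pyRange_one_append 0 (x + 1) (n - 1) (by omega) (by omega), List.find?_append]
  have hfirst : (PySem.List.pyRange 0 (x + 1) 1).find?
      (fun a => (PySem.List.pyGetD tl a 0 == c) && (decide (x < a) && !(PySem.Set.contains used a))) = none := by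
    refine List.find?_eq_none.mpr (fun a ha => ?_)
    have := (PySem.List.mem_pyRange_one.mp ha).2
    simp [show ¬ x < a by omega]
  rw [hfirst]
  simp only [Option.none_or]
  refine pvFind?_congr _ _ _ (fun a ha => ?_)
  have := (PySem.List.mem_pyRange_one.mp ha).1
  simp [show x < a by omega, Bool.and_comm]

-- if x is already marked, A's inner loop is the identity
theorem pvAInner_mem (tl : List Int) (n fin x : Int) (exm : List Int)
    (acc : List (Int × Int)) (y : Int) (hx : x ∈ exm) :
    pvAInner tl n fin x exm acc y = (acc, exm) := by
  induction y using pvAInner.induct tl n fin x exm with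
  | case1 y h hcond hsum => exact absurd hx hcond.1
  | case2 y h hcond hsum ih =>
    rw [pvAInner.eq_def, dif_pos h, if_pos hcond, if_neg hsum]; exact ih
  | case3 y h hcond ih =>
    rw [pvAInner.eq_def, dif_pos h, if_neg hcond]; exact ih
  | case4 y h => rw [pvAInner.eq_def, dif_neg h]

-- if x is not marked, A's inner loop finds the first matching unmarked partner
theorem pvAInner_find (tl : List Int) (n fin x : Int) (exm : List Int)
    (acc : List (Int × Int)) (y : Int) (hx : x ∉ exm) :
    pvAInner tl n fin x exm acc y =
      match (PySem.List.pyRange y (n - 1) 1).find?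
          (fun z => !(decide (z ∈ exm))
            && decide (PySem.List.pyGetD tl x 0 + PySem.List.pyGetD tl z 0 = fin)) with
      | some z => (acc ++ [(x, z)], (exm ++ [x]) ++ [z])
      | none => (acc, exm) := by
  induction y using pvAInner.induct tl n fin x exm with
  | case1 y h hcond hsum =>
    rw [PySem.List.pyRange_one_cons (by omega)]
    rw [pvAInner.eq_def, dif_pos h, if_pos hcond, if_pos hsum, List.find?_cons]
    simp [hcond.2, hsum]
  | case2 y h hcond hsum ih =>
    rw [PySem.List.pyRange_one_cons (by omega), List.find?_cons]
    have : (!(decide (y ∈ exm))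
        && decide (PySem.List.pyGetD tl x 0 + PySem.List.pyGetD tl y 0 = fin)) = false := by
      simp [hcond.2, hsum]
    rw [this, pvAInner.eq_def, dif_pos h, if_pos hcond, if_neg hsum]
    exact ih
  | case3 y h hcond ih =>
    have hy : y ∈ exm := by
      by_contra hy
      exact hcond ⟨hx, hy⟩
    rw [PySem.List.pyRange_one_cons (by omega), List.find?_cons]
    have : (!(decide (y ∈ exm))
        && decide (PySem.List.pyGetD tl x 0 + PySem.List.pyGetD tl y 0 = fin)) = false := by
      simp [hy]
    rw [this, pvAInner.eq_def, dif_pos h, if_neg hcond]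
    exact ih
  | case4 y h =>
    rw [PySem.List.pyRange_one_eq_nil (by omega), pvAInner.eq_def, dif_neg h]
    rfl

-- main loop correspondence: A's outer loop from x equals B's fold over range(x, n-1),
-- provided examine_list and used have the same members
theorem pvOuter_eq (tl : List Int) (n fin : Int) (k : Nat) :
    ∀ (x : Int) (exm : List Int) (used : PySem.Set Int) (acc : List (Int × Int)),
      (n - 1 - x).toNat = k → 0 ≤ x → (∀ i : Int, i ∈ exm ↔ i ∈ used) →
      pvAOuter tl n fin x exm acc
        = ((PySem.List.pyRange x (n - 1) 1).foldl (pvBBody tl fin (pvBPos tl n)) (used, acc)).2 := by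
  induction k using Nat.strong_induction_on with
  | _ k ih =>
    intro x exm used acc hk h0 hinv
    by_cases hx : x < n - 1
    · rw [PySem.List.pyRange_one_cons hx, List.foldl_cons]
      have hcontains : PySem.Set.contains used x = decide (x ∈ exm) := by
        simp [PySem.Set.contains, hinv x]
      by_cases hmem : x ∈ exm
      · -- x already used: both sides skip
        rw [pvAOuter, dif_pos hx]
        simp only [pvAInner_mem tl n fin x exm acc (x + 1) hmem]
        rw [show pvBBody tl fin (pvBPos tl n) (used, acc) x = (used, acc) by
          simp [pvBBody, (hinv x).mp hmem]]
        exact ih _ (by omega) (x + 1) exm used acc rfl (by omega) hinv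
      · -- x free: both sides search for the same first partner
        have hscan := pvBScan_pos tl n x (fin - PySem.List.pyGetD tl x 0) used h0 hx
        have hpred : ∀ a ∈ PySem.List.pyRange (x + 1) (n - 1) 1,
            (fun z => !(decide (z ∈ exm))
              && decide (PySem.List.pyGetD tl x 0 + PySem.List.pyGetD tl z 0 = fin)) a
            = (fun y => !(PySem.Set.contains used y)
              && (PySem.List.pyGetD tl y 0 == fin - PySem.List.pyGetD tl x 0)) a := by
          intro a _
          have h1 : PySem.Set.contains used a = decide (a ∈ exm) := by
            simp [PySem.Set.contains, hinv a]
          have h2 : (PySem.List.pyGetD tl x 0 + PySem.List.pyGetD tl a 0 = fin)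
              ↔ (PySem.List.pyGetD tl a 0 = fin - PySem.List.pyGetD tl x 0) := by omega
          simp only [Bool.beq_eq_decide_eq, h1, decide_eq_decide.mpr h2]
        rw [pvAOuter, dif_pos hx]
        simp only [pvAInner_find tl n fin x exm acc (x + 1) hmem,
          pvFind?_congr _ _ _ hpred]
        rw [show pvBBody tl fin (pvBPos tl n) (used, acc) x
            = match (PySem.List.pyRange (x + 1) (n - 1) 1).find?
                (fun y => !(PySem.Set.contains used y)
                  && (PySem.List.pyGetD tl y 0 == fin - PySem.List.pyGetD tl x 0)) with
              | none => (used, acc)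
              | some y => (PySem.Set.add (PySem.Set.add used x) y, acc ++ [(x, y)]) by
          have hnc : ¬ x ∈ used := fun h => hmem ((hinv x).mpr h)
          simp [pvBBody, hnc, hscan]]
        cases hfind : (PySem.List.pyRange (x + 1) (n - 1) 1).find?
            (fun y => !(PySem.Set.contains used y)
              && (PySem.List.pyGetD tl y 0 == fin - PySem.List.pyGetD tl x 0)) with
        | none =>
          simp only
          exact ih _ (by omega) (x + 1) exm used acc rfl (by omega) hinv
        | some y =>
          simp only
          refine ih _ (by omega) (x + 1) ((exm ++ [x]) ++ [y])
            (PySem.Set.add (PySem.Set.add used x) y) (acc ++ [(x, y)]) rfl (by omega) ?_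
          intro i
          simp [PySem.Set.mem_add, hinv i, or_assoc]
    · rw [pvAOuter, dif_neg hx, PySem.List.pyRange_one_eq_nil (by omega)]
      rfl

-- ===== VERDICT (by name: the statement is the Claim_ definition above) =====
theorem sum_equal_target_spec : Claim_equal_sum_equal_target := by
  intro tl _dom _pre
  unfold Spec_sum_equal_target sum_equal_target sum_equal_target_alt
  exact pvOuter_eq tl tl.length (PySem.List.pyGetD tl ((tl.length : Int) - 1) 0) _
    0 [] PySem.Set.empty [] rfl (by omega) (by intro i; simp [PySem.Set.empty])
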